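-- pv_equiv track=rewrite | github.com/Adamoutadi/Adamoutadi | NewZzscraping.py | process_pro
-- ===== SOURCE A (Python) =====
-- def process_pro(value):
--     parts = value.split()
--     new_parts = []
--     i = 0
--     while i < len(parts):
--         if i < len(parts) - 1 and parts[i+1] == "pro":
--             new_parts.append(parts[i] + "pro")
--             i += 2
--         else:
--             new_parts.append(parts[i])
--             i += 1
--     return " ".join(new_parts)
-- ===== SOURCE B (Python) =====
-- def process_pro(value):
--     result = []
--     just_merged = False
--     for t in value.split():
--         if t == "pro" and result and not just_merged:
--             result[-1] += "pro"
--             just_merged = True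
--         else:
--             result.append(t)
--             just_merged = False
--     return " ".join(result)
-- ===== Notes on version B (the rewrite author's own statement) =====
-- stated objective: simpler
-- what changed: Replaces A's index-based while loop with forward lookahead and i+=2 stepping by a single for loop that looks back: a just_merged flag suppresses merging a second consecutive 'pro' onto the previous word, exactly reproducing A's skip.
import Mathlib
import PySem

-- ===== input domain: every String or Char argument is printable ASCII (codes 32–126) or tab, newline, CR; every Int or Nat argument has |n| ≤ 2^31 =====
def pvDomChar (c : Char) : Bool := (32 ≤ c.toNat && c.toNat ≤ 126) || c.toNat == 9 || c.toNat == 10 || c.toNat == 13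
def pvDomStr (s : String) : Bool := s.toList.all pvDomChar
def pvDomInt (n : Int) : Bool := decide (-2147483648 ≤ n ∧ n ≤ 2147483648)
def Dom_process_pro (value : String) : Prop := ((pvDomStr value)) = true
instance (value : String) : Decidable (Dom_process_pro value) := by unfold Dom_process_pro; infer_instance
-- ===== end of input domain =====

-- B replaces A's index loop with forward lookahead and i += 2 by a single look-back
-- pass with a just_merged flag; same return value, objective: simpler.

-- ===== PORT A =====
-- A's while loop over index i with lookahead parts[i+1] == "pro" and i += 2,
-- transcribed as structural recursion on the remaining suffix of parts.
def loopA : List String → List String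
  | [] => []
  | [p] => [p]
  | p :: q :: rest =>
      if q == "pro" then (p ++ "pro") :: loopA rest
      else p :: loopA (q :: rest)

def process_pro (value : String) : String :=
  PySem.Str.join " " (loopA (PySem.Str.split₀ value))

-- ===== PORT B =====
-- Source B's for-loop body: state = (result list, just_merged flag)
def stepB (acc : List String × Bool) (t : String) : List String × Bool :=
  if t == "pro" && !acc.1.isEmpty && !acc.2 then
    (acc.1.dropLast ++ [((acc.1.getLast?).getD "") ++ "pro"], true)
  else
    (acc.1 ++ [t], false)

def process_pro_alt (value : String) : String :=
  PySem.Str.join " " ((PySem.Str.split₀ value).foldl stepB ([], false)).1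

-- ===== PRECONDITION & SPEC =====
def Spec_process_pro (value : String) (out : String) : Prop := out = process_pro_alt value
instance (value : String) (out : String) : Decidable (Spec_process_pro value out) := by unfold Spec_process_pro; infer_instance

-- ===== CLAIM (what is proved, stated in full; the proofs are below) =====
def Claim_equal_process_pro : Prop := ∀ (value : String), Dom_process_pro value → Spec_process_pro value (process_pro value)

-- ===== LEMMAS AND PROOFS =====

-- from a just-appended state (flag false, accumulator ending in p), B's fold
-- produces the accumulator followed by A's loop output on p :: parts
theorem runB_eq_loopA (l : List String) :
    ∀ (acc : List String) (p : String) (parts : List String), l = p :: parts →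
      (parts.foldl stepB (acc ++ [p], false)).1 = acc ++ loopA (p :: parts) := by
  induction l using loopA.induct with
  | case1 => intro acc p parts h; exact absurd h (by simp)
  | case2 p' =>
      intro acc p parts h
      injection h with h1 h2
      subst h1 h2
      simp [List.foldl, loopA]
  | case3 p' q rest hq ih =>
      intro acc p parts h
      injection h with h1 h2
      subst h1 h2
      simp only [List.foldl]
      rw [show stepB (acc ++ [p'], false) q
            = (acc ++ [p' ++ "pro"], true) by
          simp [stepB, hq]]
      cases rest with
      | nil => simp [loopA, hq]
      | cons r rest' =>
          simp only [List.foldl]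
          rw [show stepB (acc ++ [p' ++ "pro"], true) r
                = ((acc ++ [p' ++ "pro"]) ++ [r], false) by simp [stepB]]
          rw [ih (acc ++ [p' ++ "pro"]) r rest' rfl]
          simp [loopA, hq]
  | case4 p' q rest hq ih =>
      intro acc p parts h
      injection h with h1 h2
      subst h1 h2
      simp only [List.foldl]
      rw [show stepB (acc ++ [p'], false) q = ((acc ++ [p']) ++ [q], false) by
        simp [stepB, hq]]
      rw [ih (acc ++ [p']) q rest rfl]
      simp [loopA, hq]

theorem foldB_eq_loopA (parts : List String) :
    (parts.foldl stepB ([], false)).1 = loopA parts := by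
  cases parts with
  | nil => simp [loopA]
  | cons p rest =>
      simp only [List.foldl]
      rw [show stepB ([], false) p = (([] : List String) ++ [p], false) by
        simp [stepB]]
      rw [runB_eq_loopA (p :: rest) [] p rest rfl]
      simp

-- ===== VERDICT (by name: the statement is the Claim_ definition above) =====
theorem process_pro_spec : Claim_equal_process_pro := by
  intro value _
  unfold Spec_process_pro process_pro process_pro_alt
  rw [foldB_eq_loopA]
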